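-- pv_equiv track=rewrite | github.com/chakra473/sample1 | natural_odd_even_sum.py | sum_odd_even_n_nat_num_for_loop
-- ===== SOURCE A (Python) =====
-- def sum_odd_even_n_nat_num_for_loop(num):
--     """
--     this method gives sum of n natural odd and even numbers using for loop
--     :param num: input n value
--     :return: sum of n natural odd and even numbers in list
--     """
--     even_sum = 0
--     odd_sum = 0
--     for i in range(1, num + 1):
--         if i % 2 == 0:
--             even_sum += i
--         else:
--             odd_sum += i
--     return even_sum, odd_sum
-- ===== SOURCE B (Python) =====
-- def sum_odd_even_n_nat_num_for_loop(num):
--     """Closed-form: sum of first k even naturals is k*(k+1), sum of first m odd naturals is m*m."""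
--     if num <= 0:
--         return 0, 0
--     k = num // 2
--     m = (num + 1) // 2
--     return k * (k + 1), m * m
-- ===== Notes on version B (the rewrite author's own statement) =====
-- stated objective: faster
-- what changed: Replaced the linear loop over all naturals up to num by closed-form formulas: even sum k*(k+1) with k = num//2 and odd sum m*m with m the count of odd naturals.
import Mathlib
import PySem

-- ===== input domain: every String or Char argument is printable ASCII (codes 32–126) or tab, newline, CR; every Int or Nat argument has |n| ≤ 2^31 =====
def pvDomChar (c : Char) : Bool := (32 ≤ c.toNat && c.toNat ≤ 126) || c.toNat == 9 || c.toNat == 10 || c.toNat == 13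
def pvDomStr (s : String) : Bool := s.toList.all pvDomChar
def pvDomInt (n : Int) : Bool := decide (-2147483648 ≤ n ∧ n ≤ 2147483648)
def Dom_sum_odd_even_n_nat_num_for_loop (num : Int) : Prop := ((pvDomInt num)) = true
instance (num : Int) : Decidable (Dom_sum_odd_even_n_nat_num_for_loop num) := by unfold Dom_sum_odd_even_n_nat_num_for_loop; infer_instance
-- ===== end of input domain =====

-- B replaces A's O(n) loop by the closed-form pair (k*(k+1), m*m); objective: faster (asymptotic).
-- ===== PORT A =====
def sum_odd_even_n_nat_num_for_loop (num : Int) : List Int :=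
  let p := (PySem.List.pyRange 1 (num + 1) 1).foldl
    (fun (s : Int × Int) i => if PySem.Int.mod i 2 == 0 then (s.1 + i, s.2) else (s.1, s.2 + i))
    (0, 0)
  [p.1, p.2]

-- ===== PORT B =====
def sum_odd_even_n_nat_num_for_loop_alt (num : Int) : List Int :=
  if num ≤ 0 then [0, 0]
  else
    let k := PySem.Int.floordiv num 2
    let m := PySem.Int.floordiv (num + 1) 2
    [k * (k + 1), m * m]

-- ===== PRECONDITION & SPEC =====
def Spec_sum_odd_even_n_nat_num_for_loop (num : Int) (out : List Int) : Prop := out = sum_odd_even_n_nat_num_for_loop_alt num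
instance (num : Int) (out : List Int) : Decidable (Spec_sum_odd_even_n_nat_num_for_loop num out) := by unfold Spec_sum_odd_even_n_nat_num_for_loop; infer_instance

-- ===== CLAIM (what is proved, stated in full; the proofs are below) =====
def Claim_equal_sum_odd_even_n_nat_num_for_loop : Prop := ∀ (num : Int), Dom_sum_odd_even_n_nat_num_for_loop num → Spec_sum_odd_even_n_nat_num_for_loop num (sum_odd_even_n_nat_num_for_loop num)

-- ===== LEMMAS AND PROOFS =====

-- ===== VERDICT (by name: the statement is the Claim_ definition above) =====
theorem loop_closed (n : Nat) :
    (PySem.List.pyRange 1 ((n : Int) + 1) 1).foldl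
      (fun (s : Int × Int) i => if PySem.Int.mod i 2 == 0 then (s.1 + i, s.2) else (s.1, s.2 + i))
      (0, 0)
    = (((n : Int) / 2) * ((n : Int) / 2 + 1), (((n : Int) + 1) / 2) * (((n : Int) + 1) / 2)) := by
  induction n with
  | zero =>
    rw [PySem.List.pyRange_one_eq_nil (by omega)]
    simp
  | succ n ih =>
    have h : PySem.List.pyRange 1 (((n + 1 : Nat) : Int) + 1) 1
        = PySem.List.pyRange 1 ((n : Int) + 1) 1 ++ [(n : Int) + 1] := by
      have := PySem.List.pyRange_one_succ_right (a := 1) (b := (n : Int) + 1) (by omega)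
      push_cast
      push_cast at this
      exact this
    rw [h, List.foldl_append, ih]
    simp only [List.foldl]
    have hmod : PySem.Int.mod ((n : Int) + 1) 2 = ((n : Int) + 1) % 2 :=
      PySem.Int.mod_eq_emod_of_pos (by omega)
    push_cast
    rcases Int.even_or_odd (n : Int) with ⟨k, hk⟩ | ⟨k, hk⟩
    · -- n even, so n + 1 is odd: the loop adds n + 1 to odd_sum
      have hc : PySem.Int.mod ((n : Int) + 1) 2 = 1 := by rw [hmod]; omega
      simp only [hc]
      norm_num [Prod.ext_iff]
      rw [hk]
      have d1 : ((k + k : Int)) / 2 = k := by omega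
      have d2 : ((k + k : Int) + 1) / 2 = k := by omega
      have d3 : ((k + k : Int) + 1 + 1) / 2 = k + 1 := by omega
      rw [d1, d2, d3]
      constructor <;> ring
    · -- n odd, so n + 1 is even: the loop adds n + 1 to even_sum
      have hc : PySem.Int.mod ((n : Int) + 1) 2 = 0 := by rw [hmod]; omega
      simp only [hc]
      norm_num [Prod.ext_iff]
      rw [hk]
      have d1 : ((2 * k + 1 : Int)) / 2 = k := by omega
      have d2 : ((2 * k + 1 : Int) + 1) / 2 = k + 1 := by omega
      have d3 : ((2 * k + 1 : Int) + 1 + 1) / 2 = k + 1 := by omega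
      rw [d1, d2, d3]
      constructor <;> ring

theorem sum_odd_even_n_nat_num_for_loop_spec : Claim_equal_sum_odd_even_n_nat_num_for_loop := by
  intro num _
  unfold Spec_sum_odd_even_n_nat_num_for_loop sum_odd_even_n_nat_num_for_loop sum_odd_even_n_nat_num_for_loop_alt
  by_cases hn : num ≤ 0
  · rw [PySem.List.pyRange_one_eq_nil (by omega)]
    simp [hn]
  · simp only [if_neg hn]
    obtain ⟨n, rfl⟩ : ∃ n : Nat, num = (n : Int) + 1 := ⟨(num - 1).toNat, by omega⟩
    have hl := loop_closed (n + 1)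
    push_cast at hl
    rw [hl]
    rw [PySem.Int.floordiv_eq_ediv_of_pos (a := (n : Int) + 1) (by omega),
        PySem.Int.floordiv_eq_ediv_of_pos (a := (n : Int) + 1 + 1) (by omega)]
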